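-- pv_equiv track=rewrite | github.com/EcmaXp/mpoc | machine/rom/pylib/code.py | mp_repl_continue_with_input
-- ===== SOURCE A (Python) =====
-- def mp_repl_continue_with_input(line):
--     # check for blank input
--     if not line:
--         return False
--
--     # check if input starts with a certain keyword
--     starts_with_compound_keyword = False
--     for keyword in "@", "if", "while", "for", "try", "with", "def", "class":
--         starts_with_compound_keyword = starts_with_compound_keyword or line.startswith(keyword)
--
--     # check for unmatched open bracket or triple quote
--     # TODO don't look at triple quotes inside single quotes
--     n_paren = n_brack = n_brace = 0
--     in_triple_quote = 0
--     passed = 0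
--     for charno, char in enumerate(line):
--         if passed:
--             passed -= 1
--             continue
--         elif char == '(': n_paren += 1
--         elif char == ')': n_paren -= 1
--         elif char == '[': n_brack += 1
--         elif char == ']': n_brack -= 1
--         elif char == '{': n_brace += 1
--         elif char == '}': n_brace -= 1
--         elif char == "'":
--             if chr(in_triple_quote) != '"' and line[charno+1:charno+2] == line[charno+2:charno+3] == "'":
--                 passed += 2;
--                 in_triple_quote = ord("'") - in_triple_quote
--         elif char == '"':
--             if chr(in_triple_quote) != "'" and line[charno+1:charno+2] == line[charno+2:charno+3] == '"':
--                 passed += 2;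
--                 in_triple_quote = ord('"') - in_triple_quote
--
--     # continue if unmatched brackets or quotes
--     if n_paren > 0 or n_brack > 0 or n_brace > 0 or in_triple_quote != 0:
--         return True
--
--     # continue if last character was backslash (for line continuation)
--     if line.endswith('\\'):
--         return True
--
--     # continue if compound keyword and last line was not empty
--     if starts_with_compound_keyword and not line.endswith('\n'):
--         return True
--
--     # otherwise, don't continue
--     return False
-- ===== SOURCE B (Python) =====
-- def mp_repl_continue_with_input(line):
--     if not line:
--         return False
--
--     # bracket imbalances by plain substring counts (A never skips a bracket,
--     # since the characters its quote-scanner skips are always quote characters)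
--     n_paren = line.count('(') - line.count(')')
--     n_brack = line.count('[') - line.count(']')
--     n_brace = line.count('{') - line.count('}')
--
--     # separate scan recovering the open-triple-quote state
--     q = None
--     i = 0
--     n = len(line)
--     while i < n:
--         ch = line[i]
--         if (ch == "'" or ch == '"') and q != ('"' if ch == "'" else "'") \
--                 and line[i+1:i+3] == ch + ch:
--             q = None if q == ch else ch
--             i += 3
--         else:
--             i += 1
--
--     if n_paren > 0 or n_brack > 0 or n_brace > 0 or q is not None:
--         return True
--     if line.endswith('\\'):
--         return True
--     if line.startswith(('@', 'if', 'while', 'for', 'try', 'with', 'def', 'class')) \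
--             and not line.endswith('\n'):
--         return True
--     return False
-- ===== Notes on version B (the rewrite author's own statement) =====
-- stated objective: alternative
-- what changed: A's single fused scan (bracket counters + triple-quote state machine with a skip counter) is split into plain substring-count subtractions for the three bracket imbalances plus a separate quote-only index scan for the triple-quote state.
import Mathlib
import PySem

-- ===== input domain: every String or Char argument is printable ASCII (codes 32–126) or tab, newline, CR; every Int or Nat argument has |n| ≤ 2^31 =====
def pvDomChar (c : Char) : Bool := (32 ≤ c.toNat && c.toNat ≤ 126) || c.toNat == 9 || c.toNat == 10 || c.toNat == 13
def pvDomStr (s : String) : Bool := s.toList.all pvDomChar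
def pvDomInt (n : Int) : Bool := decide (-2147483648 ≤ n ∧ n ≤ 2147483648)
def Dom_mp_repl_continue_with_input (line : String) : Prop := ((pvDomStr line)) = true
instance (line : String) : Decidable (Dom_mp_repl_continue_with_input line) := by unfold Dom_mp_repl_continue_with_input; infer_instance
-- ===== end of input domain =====

-- B replaces A's fused bracket/quote pass by substring-count bracket imbalances plus a
-- separate quote-only scan (objective: alternative decomposition; same asymptotic cost).

-- ===== PORT A =====
-- A's for-loop over enumerate(line) with the `passed` skip counter, as structural recursion
-- over the remaining characters with the same state (n_paren, n_brack, n_brace,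
-- in_triple_quote, passed).  The lookahead slices line[charno+1:charno+2] and
-- line[charno+2:charno+3] are the clamped one-element slices of the string just after the
-- current character, i.e. rest.take 1 and (rest.drop 1).take 1 where rest is the remaining
-- suffix after the current char — exact, since Python slices clamp past the end.
-- chr(in_triple_quote) != '\"' is in_triple_quote ≠ 34 and chr(in_triple_quote) != "'" is
-- in_triple_quote ≠ 39 — exact here: in_triple_quote only ever holds 0, 39 = ord("'"),
-- 34 = ord('\"'), and chr is injective.
def pvALoop : List Char → Int → Int → Int → Int → Nat → Int × Int × Int × Int
  | [], np, nk, nb, itq, _ => (np, nk, nb, itq)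
  | c :: rest, np, nk, nb, itq, passed =>
    if passed ≠ 0 then pvALoop rest np nk nb itq (passed - 1)
    else if c = '(' then pvALoop rest (np + 1) nk nb itq 0
    else if c = ')' then pvALoop rest (np - 1) nk nb itq 0
    else if c = '[' then pvALoop rest np (nk + 1) nb itq 0
    else if c = ']' then pvALoop rest np (nk - 1) nb itq 0
    else if c = '{' then pvALoop rest np nk (nb + 1) itq 0
    else if c = '}' then pvALoop rest np nk (nb - 1) itq 0
    else if c = '\'' then
      if itq ≠ 34 ∧ rest.take 1 = (rest.drop 1).take 1 ∧ (rest.drop 1).take 1 = ['\''] then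
        pvALoop rest np nk nb (39 - itq) 2
      else pvALoop rest np nk nb itq 0
    else if c = '"' then
      if itq ≠ 39 ∧ rest.take 1 = (rest.drop 1).take 1 ∧ (rest.drop 1).take 1 = ['"'] then
        pvALoop rest np nk nb (34 - itq) 2
      else pvALoop rest np nk nb itq 0
    else pvALoop rest np nk nb itq 0

def mp_repl_continue_with_input (line : String) : Bool :=
  if line.toList = [] then false
  else
    let skw := (["@", "if", "while", "for", "try", "with", "def", "class"] : List String).foldl
      (fun acc k => acc || PySem.Str.startswith line k) false
    match pvALoop line.toList 0 0 0 0 0 with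
    | (np, nk, nb, itq) =>
      if np > 0 || nk > 0 || nb > 0 || itq ≠ 0 then true
      else if PySem.Str.endswith line "\\" then true
      else if skw && !(PySem.Str.endswith line "\n") then true
      else false

-- ===== PORT B =====
-- Source B's while-loop over index i: only the current quote state q and the index move;
-- line[i+1:i+3] == ch + ch is rest.take 2 = [c, c] for the remaining suffix rest, and
-- i += 3 drops the two matched lookahead characters (exact: slices clamp past the end).
def pvBQuote : List Char → Option Char → Option Char
  | [], q => q
  | c :: rest, q =>
    if (c = '\'' ∨ c = '"') ∧ q ≠ some (if c = '\'' then '"' else '\'') ∧ rest.take 2 = [c, c]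
    then pvBQuote (rest.drop 2) (if q = some c then none else some c)
    else pvBQuote rest q
termination_by cs _ => cs.length
decreasing_by
  all_goals simp

def mp_repl_continue_with_input_alt (line : String) : Bool :=
  if line.toList = [] then false
  else
    let np : Int := (PySem.Str.count line "(" : Int) - (PySem.Str.count line ")" : Int)
    let nk : Int := (PySem.Str.count line "[" : Int) - (PySem.Str.count line "]" : Int)
    let nb : Int := (PySem.Str.count line "{" : Int) - (PySem.Str.count line "}" : Int)
    let q := pvBQuote line.toList none
    if np > 0 || nk > 0 || nb > 0 || q.isSome then true
    else if PySem.Str.endswith line "\\" then true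
    else if (["@", "if", "while", "for", "try", "with", "def", "class"] : List String).any
        (fun k => PySem.Str.startswith line k) && !(PySem.Str.endswith line "\n") then true
    else false

-- ===== PRECONDITION & SPEC =====
def Spec_mp_repl_continue_with_input (line : String) (out : Bool) : Prop := out = mp_repl_continue_with_input_alt line
instance (line : String) (out : Bool) : Decidable (Spec_mp_repl_continue_with_input line out) := by unfold Spec_mp_repl_continue_with_input; infer_instance

-- ===== CLAIM (what is proved, stated in full; the proofs are below) =====
def Claim_equal_mp_repl_continue_with_input : Prop := ∀ (line : String), Dom_mp_repl_continue_with_input line → Spec_mp_repl_continue_with_input line (mp_repl_continue_with_input line)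

-- ===== LEMMAS AND PROOFS =====

-- pvEnc encodes B's quote state as A's ord-valued in_triple_quote; pvQOK is the invariant
-- that the state is one of None / "'" / '"'.
def pvEnc : Option Char → Int
  | none => 0
  | some c => (c.toNat : Int)

def pvQOK (q : Option Char) : Prop := q = none ∨ q = some '\'' ∨ q = some '"'

theorem aLoop_skip (x y : Char) (r : List Char) (np nk nb itq : Int) :
    pvALoop (x :: y :: r) np nk nb itq 2 = pvALoop r np nk nb itq 0 := by
  rw [pvALoop, if_pos (by decide)]
  rw [pvALoop, if_pos (by decide)]

theorem take2_iff (rest : List Char) (c : Char) :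
    (rest.take 1 = (rest.drop 1).take 1 ∧ (rest.drop 1).take 1 = [c]) ↔ rest.take 2 = [c, c] := by
  rcases rest with _ | ⟨x, _ | ⟨y, r⟩⟩ <;> simp
  · aesop

theorem enc_ne34 (q : Option Char) (hq : pvQOK q) : pvEnc q ≠ 34 ↔ q ≠ some '"' := by
  rcases hq with rfl | rfl | rfl <;> simp [pvEnc]

theorem enc_ne39 (q : Option Char) (hq : pvQOK q) : pvEnc q ≠ 39 ↔ q ≠ some '\'' := by
  rcases hq with rfl | rfl | rfl <;> simp [pvEnc]

theorem toggle39 (q : Option Char) (hq : pvQOK q) (h : q ≠ some '"') :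
    (39 : Int) - pvEnc q = pvEnc (if q = some '\'' then none else some '\'') := by
  rcases hq with rfl | rfl | rfl <;> simp_all [pvEnc]

theorem toggle34 (q : Option Char) (hq : pvQOK q) (h : q ≠ some '\'') :
    (34 : Int) - pvEnc q = pvEnc (if q = some '"' then none else some '"') := by
  rcases hq with rfl | rfl | rfl <;> simp_all [pvEnc]

theorem qok_toggle (q : Option Char) (hq : pvQOK q) (c : Char) (hc : c = '\'' ∨ c = '"') :
    pvQOK (if q = some c then none else some c) := by
  rcases hc with rfl | rfl <;> rcases hq with rfl | rfl | rfl <;> simp [pvQOK]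

theorem pvSim : ∀ (n : Nat) (cs : List Char), cs.length ≤ n → ∀ (q : Option Char), pvQOK q →
    ∀ (np nk nb : Int),
    pvALoop cs np nk nb (pvEnc q) 0 =
      (np + (cs.count '(' : Int) - (cs.count ')' : Int),
       nk + (cs.count '[' : Int) - (cs.count ']' : Int),
       nb + (cs.count '{' : Int) - (cs.count '}' : Int),
       pvEnc (pvBQuote cs q)) := by
  intro n
  induction n with
  | zero =>
    intro cs hlen q hq np nk nb
    rw [List.length_eq_zero_iff.mp (Nat.le_zero.mp hlen)]
    simp [pvALoop, pvBQuote]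
  | succ n ih =>
    intro cs hlen q hq np nk nb
    match cs with
    | [] => simp [pvALoop, pvBQuote]
    | c :: rest =>
      by_cases hg : (c = '\'' ∨ c = '"') ∧ q ≠ some (if c = '\'' then '"' else '\'') ∧ rest.take 2 = [c, c]
      · obtain ⟨hc, hq2, ht⟩ := hg
        obtain ⟨x, y, r, rfl⟩ : ∃ x y r, rest = x :: y :: r := by
          rcases rest with _ | ⟨x, _ | ⟨y, r⟩⟩ <;> simp_all
        simp at ht
        obtain ⟨rfl, rfl⟩ := ht
        have hr : r.length ≤ n := by simp at hlen; omega
        rcases hc with rfl | rfl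
        · -- c = '\''
          simp at hq2
          have h34 : pvEnc q ≠ 34 := (enc_ne34 q hq).mpr hq2
          rw [pvBQuote, if_pos ⟨Or.inl rfl, hq2, by simp⟩]
          simp only [List.drop_succ_cons, List.drop_zero]
          rw [pvALoop, if_neg (by decide), if_neg (by decide), if_neg (by decide),
            if_neg (by decide), if_neg (by decide), if_neg (by decide), if_neg (by decide),
            if_pos rfl, if_pos ⟨h34, by simp, by simp⟩, aLoop_skip,
            toggle39 q hq hq2, ih r hr _ (qok_toggle q hq _ (Or.inl rfl))]
          simp [Prod.mk.injEq, List.count_cons]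
        · -- c = '"'
          simp at hq2
          have h39 : pvEnc q ≠ 39 := (enc_ne39 q hq).mpr hq2
          rw [pvBQuote, if_pos ⟨Or.inr rfl, hq2, by simp⟩]
          simp only [List.drop_succ_cons, List.drop_zero]
          rw [pvALoop, if_neg (by decide), if_neg (by decide), if_neg (by decide),
            if_neg (by decide), if_neg (by decide), if_neg (by decide), if_neg (by decide),
            if_neg (by decide), if_pos rfl, if_pos ⟨h39, by simp, by simp⟩, aLoop_skip,
            toggle34 q hq hq2, ih r hr _ (qok_toggle q hq _ (Or.inr rfl))]
          simp [Prod.mk.injEq, List.count_cons]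
      · rw [pvBQuote, if_neg hg]
        have hrest : rest.length ≤ n := by simp at hlen; omega
        have hstep := ih rest hrest q hq
        by_cases h1 : c = '('
        · subst h1
          rw [pvALoop, if_neg (by decide), if_pos rfl, hstep]
          simp [Prod.mk.injEq, List.count_cons]; omega
        by_cases h2 : c = ')'
        · subst h2
          rw [pvALoop, if_neg (by decide), if_neg (by decide), if_pos rfl, hstep]
          simp [Prod.mk.injEq, List.count_cons]; omega
        by_cases h3 : c = '['
        · subst h3
          rw [pvALoop, if_neg (by decide), if_neg (by decide), if_neg (by decide), if_pos rfl, hstep]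
          simp [Prod.mk.injEq, List.count_cons]; omega
        by_cases h4 : c = ']'
        · subst h4
          rw [pvALoop, if_neg (by decide), if_neg (by decide), if_neg (by decide),
            if_neg (by decide), if_pos rfl, hstep]
          simp [Prod.mk.injEq, List.count_cons]; omega
        by_cases h5 : c = '{'
        · subst h5
          rw [pvALoop, if_neg (by decide), if_neg (by decide), if_neg (by decide),
            if_neg (by decide), if_neg (by decide), if_pos rfl, hstep]
          simp [Prod.mk.injEq, List.count_cons]; omega
        by_cases h6 : c = '}'
        · subst h6
          rw [pvALoop, if_neg (by decide), if_neg (by decide), if_neg (by decide),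
            if_neg (by decide), if_neg (by decide), if_neg (by decide), if_pos rfl, hstep]
          simp [Prod.mk.injEq, List.count_cons]; omega
        by_cases h7 : c = '\''
        · subst h7
          have hAg : ¬(pvEnc q ≠ 34 ∧ rest.take 1 = (rest.drop 1).take 1 ∧ (rest.drop 1).take 1 = ['\'']) := by
            intro ⟨ha, hb⟩
            exact hg ⟨Or.inl rfl, by simpa using (enc_ne34 q hq).mp ha, (take2_iff rest '\'').mp hb⟩
          rw [pvALoop, if_neg (by decide), if_neg (by decide), if_neg (by decide),
            if_neg (by decide), if_neg (by decide), if_neg (by decide), if_neg (by decide),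
            if_pos rfl, if_neg hAg, hstep]
          simp [Prod.mk.injEq, List.count_cons]
        by_cases h8 : c = '"'
        · subst h8
          have hAg : ¬(pvEnc q ≠ 39 ∧ rest.take 1 = (rest.drop 1).take 1 ∧ (rest.drop 1).take 1 = ['"']) := by
            intro ⟨ha, hb⟩
            exact hg ⟨Or.inr rfl, by simpa using (enc_ne39 q hq).mp ha, (take2_iff rest '"').mp hb⟩
          rw [pvALoop, if_neg (by decide), if_neg (by decide), if_neg (by decide),
            if_neg (by decide), if_neg (by decide), if_neg (by decide), if_neg (by decide),
            if_neg (by decide), if_pos rfl, if_neg hAg, hstep]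
          simp [Prod.mk.injEq, List.count_cons]
        · rw [pvALoop, if_neg (by decide), if_neg h1, if_neg h2, if_neg h3, if_neg h4,
            if_neg h5, if_neg h6, if_neg h7, if_neg h8, hstep]
          simp [Prod.mk.injEq, List.count_cons, h1, h2, h3, h4, h5, h6]

theorem qok_run : ∀ (n : Nat) (cs : List Char), cs.length ≤ n → ∀ (q : Option Char), pvQOK q →
    pvQOK (pvBQuote cs q) := by
  intro n
  induction n with
  | zero =>
    intro cs hlen q hq
    rw [List.length_eq_zero_iff.mp (Nat.le_zero.mp hlen)]
    simpa [pvBQuote] using hq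
  | succ n ih =>
    intro cs hlen q hq
    match cs with
    | [] => simpa [pvBQuote] using hq
    | c :: rest =>
      by_cases hg : (c = '\'' ∨ c = '"') ∧ q ≠ some (if c = '\'' then '"' else '\'') ∧ rest.take 2 = [c, c]
      · rw [pvBQuote, if_pos hg]
        exact ih _ (by simp at hlen ⊢; omega) _ (qok_toggle q hq c hg.1)
      · rw [pvBQuote, if_neg hg]
        exact ih rest (by simp at hlen; omega) q hq

theorem enc_ne0 (q : Option Char) (hq : pvQOK q) : decide (pvEnc q = 0) = !q.isSome := by
  rcases hq with rfl | rfl | rfl <;> simp [pvEnc]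

theorem cnt_go (c : Char) : ∀ (fuel : Nat) (l : List Char) (acc : Nat), l.length ≤ fuel →
    PySem.Chars.count.go [c] fuel l acc = acc + l.count c := by
  intro fuel
  induction fuel with
  | zero => intro l acc h; cases l with
    | nil => simp [PySem.Chars.count.go]
    | cons x t => simp at h
  | succ n ih => intro l acc h; cases l with
    | nil => simp [PySem.Chars.count.go]
    | cons x t =>
      by_cases hx : c = x
      · subst hx
        rw [PySem.Chars.count.go]
        simp [List.isPrefixOf, ih t (acc+1) (by simpa using h)]
        omega
      · rw [PySem.Chars.count.go]
        simp [List.isPrefixOf, hx, ih t acc (by simpa using h), List.count_cons]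
        simp [Ne.symm hx]

theorem cnt (cs : List Char) (c : Char) : PySem.Chars.count cs [c] = cs.count c := by
  simp [PySem.Chars.count, cnt_go c cs.length cs 0 le_rfl]

theorem main_spec (line : String) :
    mp_repl_continue_with_input line = mp_repl_continue_with_input_alt line := by
  by_cases hnil : line.toList = []
  · simp [mp_repl_continue_with_input, mp_repl_continue_with_input_alt, hnil]
  · have hsim := pvSim line.toList.length line.toList le_rfl none (Or.inl rfl) 0 0 0
    have hqok := qok_run line.toList.length line.toList le_rfl none (Or.inl rfl)
    rw [show pvEnc none = 0 from rfl] at hsim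
    rw [mp_repl_continue_with_input, mp_repl_continue_with_input_alt, if_neg hnil, if_neg hnil]
    rw [hsim]
    have hkw : (["@", "if", "while", "for", "try", "with", "def", "class"] : List String).foldl
        (fun acc k => acc || PySem.Str.startswith line k) false
        = (["@", "if", "while", "for", "try", "with", "def", "class"] : List String).any
        (fun k => PySem.Str.startswith line k) := by
      simp [List.foldl, List.any, Bool.or_assoc]
    have hcnt : ∀ (c : Char), PySem.Str.count line (String.ofList [c]) = line.toList.count c := by
      intro c; rw [PySem.Str.count]; simp [cnt]
    rw [hkw]
    simp only [show ("(" : String) = String.ofList ['('] from rfl,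
      show (")" : String) = String.ofList [')'] from rfl,
      show ("[" : String) = String.ofList ['['] from rfl,
      show ("]" : String) = String.ofList [']'] from rfl,
      show ("{" : String) = String.ofList ['{'] from rfl,
      show ("}" : String) = String.ofList ['}'] from rfl, hcnt]
    simp [enc_ne0 _ hqok]

-- ===== VERDICT (by name: the statement is the Claim_ definition above) =====
theorem mp_repl_continue_with_input_spec : Claim_equal_mp_repl_continue_with_input := by
  intro line _
  unfold Spec_mp_repl_continue_with_input
  exact main_spec line
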